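-- pv_equiv track=rewrite | github.com/Shusmoy108/Data-Science | Ex01_CountLetters/Ex01_CountLetters.py | count_mult
-- ===== SOURCE A (Python) =====
-- from collections import Counter
--
-- def count_mult(words):
--     '''Returns a dictionary with the number of times a letter
--        occurs multiple times in a word'''
--     data={}
--     for word in words:
--         counter = Counter(word)
--         for char in counter:
--             if(counter[char]>1):
--                 if char not in data:
--                     data[char]=0
--                 data[char]+=1
--     return data
-- ===== SOURCE B (Python) =====
-- def count_mult(words):
--     '''Returns a dictionary with the number of times a letter
--        occurs multiple times in a word'''
--     data = {}
--     for word in words: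
--         sc = sorted(word)
--         # a letter occurs more than once iff it occupies two adjacent
--         # positions of the sorted character sequence
--         dup = {a for a, b in zip(sc, sc[1:]) if a == b}
--         for ch in dict.fromkeys(word):   # distinct letters, first-occurrence order
--             if ch in dup:
--                 data[ch] = data.get(ch, 0) + 1
--     return data
-- ===== Notes on version B (the rewrite author's own statement) =====
-- stated objective: alternative
-- what changed: Instead of building a Counter per word and filtering keys with count>1, B sorts each word's characters and detects duplicated letters as adjacent equal pairs of the sorted sequence, then increments the tally over the word's ordered distinct letters.
import Mathlib
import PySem

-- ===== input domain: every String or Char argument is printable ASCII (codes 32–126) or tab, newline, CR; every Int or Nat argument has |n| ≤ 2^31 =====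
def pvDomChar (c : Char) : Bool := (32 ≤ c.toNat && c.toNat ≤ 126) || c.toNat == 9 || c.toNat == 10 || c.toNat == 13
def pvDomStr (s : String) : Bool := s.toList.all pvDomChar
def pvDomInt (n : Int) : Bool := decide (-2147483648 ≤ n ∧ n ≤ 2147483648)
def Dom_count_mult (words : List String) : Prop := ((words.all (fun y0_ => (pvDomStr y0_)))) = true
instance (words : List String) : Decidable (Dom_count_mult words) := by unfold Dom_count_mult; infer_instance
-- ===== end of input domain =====

-- B replaces per-word Counter-and-threshold by sort-then-adjacent-scan: duplicated
-- letters are adjacent equal pairs of the sorted character sequence; objective: alternative.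

-- ===== PORT A =====
-- counter = Counter(word)
def pyCounterA (word : String) : PySem.Dict Char Int :=
  word.toList.foldl (fun d c => d.insert c (d.getD c 0 + 1)) PySem.Dict.empty

def count_mult_word (data : PySem.Dict String Int) (word : String) : PySem.Dict String Int :=
  -- for char in counter: if counter[char] > 1: …
  (pyCounterA word).keys.foldl (fun data char =>
    if (pyCounterA word).getD char 0 > 1 then
      let data := if data.contains (String.ofList [char]) then data
                  else data.insert (String.ofList [char]) 0      -- data[char] = 0
      data.insert (String.ofList [char]) (data.getD (String.ofList [char]) 0 + 1)  -- data[char] += 1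
    else data) data

def count_mult (words : List String) : List (String × Int) :=
  (words.foldl count_mult_word PySem.Dict.empty).items

-- ===== PORT B =====
-- dup = {a for a, b in zip(sc, sc[1:]) if a == b}   where sc = sorted(word)
def dupOf (word : String) : PySem.Set Char :=
  let sc := PySem.List.sorted word.toList (fun x => x) false
  (sc.zip (PySem.List.slice sc (some 1) none)).foldl
    (fun s p => if p.1 = p.2 then s.add p.1 else s) PySem.Set.empty

def count_mult_alt_word (data : PySem.Dict String Int) (word : String) : PySem.Dict String Int :=
  -- for ch in dict.fromkeys(word): if ch in dup: data[ch] = data.get(ch, 0) + 1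
  (PySem.List.dedup word.toList).foldl (fun data ch =>
    if (dupOf word).contains ch then
      data.insert (String.ofList [ch]) (data.getD (String.ofList [ch]) 0 + 1)
    else data) data

def count_mult_alt (words : List String) : List (String × Int) :=
  (words.foldl count_mult_alt_word PySem.Dict.empty).items

-- ===== PRECONDITION & SPEC =====
def Spec_count_mult (words : List String) (out : List (String × Int)) : Prop := out = count_mult_alt words
instance (words : List String) (out : List (String × Int)) : Decidable (Spec_count_mult words out) := by unfold Spec_count_mult; infer_instance

-- ===== CLAIM (what is proved, stated in full; the proofs are below) =====
def Claim_equal_count_mult : Prop := ∀ (words : List String), Dom_count_mult words → Spec_count_mult words (count_mult words)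

-- ===== LEMMAS AND PROOFS =====

-- membership in the set built by B's comprehension fold
theorem mem_adjFold (ps : List (Char × Char)) (s0 : PySem.Set Char) (x : Char) :
    x ∈ ps.foldl (fun s p => if p.1 = p.2 then s.add p.1 else s) s0
      ↔ x ∈ s0 ∨ ∃ p ∈ ps, p.1 = p.2 ∧ p.1 = x := by
  induction ps generalizing s0 with
  | nil => simp
  | cons p ps ih =>
    simp only [List.foldl_cons]
    by_cases h : p.1 = p.2
    · rw [if_pos h, ih]
      simp [PySem.Set.mem_add]
      tauto
    · rw [if_neg h, ih]
      simp only [List.mem_cons]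
      constructor
      · rintro (hs | ⟨q, hq, h1, h2⟩)
        · exact Or.inl hs
        · exact Or.inr ⟨q, Or.inr hq, h1, h2⟩
      · rintro (hs | ⟨q, (rfl | hq), h1, h2⟩)
        · exact Or.inl hs
        · exact absurd h1 h
        · exact Or.inr ⟨q, hq, h1, h2⟩

-- in a ≤-sorted list, an adjacent equal pair at x exists iff x occurs at least twice
theorem sorted_adj_count (l : List Char) (h : l.Pairwise (· ≤ ·)) (x : Char) :
    (∃ p ∈ l.zip l.tail, p.1 = p.2 ∧ p.1 = x) ↔ 2 ≤ l.count x := by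
  induction l with
  | nil => simp
  | cons a t ih =>
    cases t with
    | nil =>
      simp only [List.tail_cons, List.zip_nil_right, List.not_mem_nil, false_and,
        exists_const, false_iff, not_le, List.count_cons, List.count_nil]
      split <;> omega
    | cons b t' =>
      have hab : a ≤ b := (List.pairwise_cons.mp h).1 b (by simp)
      have ht : (b :: t').Pairwise (· ≤ ·) := (List.pairwise_cons.mp h).2
      have ih' := ih ht
      simp only [List.tail_cons, List.zip_cons_cons, List.mem_cons] at *
      constructor
      · rintro ⟨p, (rfl | hp), h1, h2⟩
        · have hb : a = b := h1
          have hx : a = x := h2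
          subst hx; subst hb
          simp only [List.count_cons, beq_self_eq_true, if_pos]
          omega
        · have hge := ih'.mp ⟨p, hp, h1, h2⟩
          rw [List.count_cons]
          split <;> omega
      · intro hc
        by_cases hx : x = a
        · subst hx
          rw [List.count_cons] at hc
          simp only [beq_self_eq_true, if_pos] at hc
          have hmem : x ∈ b :: t' := List.count_pos_iff.mp (by omega)
          have hba : b = x := by
            rcases List.mem_cons.mp hmem with h1 | h1
            · exact h1.symm
            · exact le_antisymm ((List.pairwise_cons.mp ht).1 x h1) hab
          exact ⟨(x, b), Or.inl rfl, hba.symm, rfl⟩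
        · have hc' : 2 ≤ (b :: t').count x := by
            rw [List.count_cons] at hc
            have hne : (a == x) = false := by
              simp only [beq_eq_false_iff_ne, ne_eq]
              exact fun h => hx h.symm
            rw [hne] at hc
            simpa using hc
          obtain ⟨p, hp, h1, h2⟩ := ih'.mpr hc'
          exact ⟨p, Or.inr hp, h1, h2⟩

theorem mem_dupOf (word : String) (x : Char) :
    x ∈ dupOf word ↔ 2 ≤ word.toList.count x := by
  unfold dupOf
  rw [mem_adjFold]
  simp only [PySem.Set.empty, List.not_mem_nil, false_or, PySem.List.slice_from_one]
  rw [sorted_adj_count _ (by simpa using PySem.List.sorted_pairwise word.toList (fun x => x) )]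
  rw [List.Perm.count_eq (PySem.List.sorted_perm word.toList (fun x => x) false)]

-- A's conditional "create then increment" is one get-or-default increment
theorem bump_eq (d : PySem.Dict String Int) (k : String) :
    (let d' := if d.contains k then d else d.insert k 0;
     d'.insert k (d'.getD k 0 + 1)) = d.insert k (d.getD k 0 + 1) := by
  by_cases h : d.contains k
  · simp [h]
  · simp only [h, Bool.false_eq_true, if_neg, not_false_iff]
    rw [PySem.Dict.getD_insert, PySem.Dict.insert_insert_self,
        PySem.Dict.getD_of_not_contains d 0 (by simpa using h)]
    simp

-- the two per-word updates agree
theorem word_eq (data : PySem.Dict String Int) (word : String) :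
    count_mult_word data word = count_mult_alt_word data word := by
  unfold count_mult_word count_mult_alt_word
  have hcntr : pyCounterA word = PySem.Dict.counter word.toList :=
    PySem.Dict.foldl_insert_getD_add_one_eq_counter word.toList
  rw [hcntr, PySem.Dict.keys_counter, PySem.List.dedup_eq_ofList]
  apply PySem.List.foldl_congr_mem
  intro acc c hc
  have hdup : ((dupOf word).contains c) = decide (2 ≤ word.toList.count c) := by
    by_cases h2 : 2 ≤ word.toList.count c
    · rw [decide_eq_true h2]
      exact (PySem.Set.contains_iff _ c).mpr ((mem_dupOf word c).mpr h2)
    · rw [decide_eq_false h2]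
      rcases Bool.eq_false_or_eq_true ((dupOf word).contains c) with hb | hb
      · exact absurd ((mem_dupOf word c).mp ((PySem.Set.contains_iff _ c).mp hb)) h2
      · exact hb
  rw [PySem.Dict.getD_counter, hdup]
  by_cases h2 : 2 ≤ word.toList.count c
  · have h1 : ((word.toList.count c : Int) > 1) := by exact_mod_cast h2
    have h3 : decide (2 ≤ word.toList.count c) = true := decide_eq_true h2
    rw [if_pos h1, if_pos h3]
    exact bump_eq acc (String.ofList [c])
  · have h1 : ¬ ((word.toList.count c : Int) > 1) := by omega
    have h3 : ¬ (decide (2 ≤ word.toList.count c) = true) := by simpa using h2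
    rw [if_neg h1, if_neg h3]

-- ===== VERDICT (by name: the statement is the Claim_ definition above) =====
theorem count_mult_spec : Claim_equal_count_mult := by
  intro words _
  unfold Spec_count_mult count_mult count_mult_alt
  congr 1
  exact PySem.List.foldl_congr_mem words _ _ _ (fun acc w _ => word_eq acc w)
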